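-- pv_equiv track=rewrite | github.com/Chansazm/Project_26_Hackerrank | frequency_Queries.py | FreQuery
-- ===== SOURCE A (Python) =====
-- from collections import defaultdict
--
-- def FreQuery(quries):
--     res = []
--     Freq = defaultdict(int)
--
--     for x in quries:
--         if x[0] == 1:
--             #insert x in the data structure
--             Freq[x[1]] += 1
--         elif x[0] == 2:
--             #Delete one occurence of y from your data structure, if present.
--             if x[1] in Freq and x[1] > 0:
--                 Freq[x[1]] -= 1
--         else:
--             #Check if any integer is present whose frequency is exactly . If yes, print 1 else 0
--             res.append(1 if x[1] in set(Freq.values()) else 0)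
--     return res
-- ===== SOURCE B (Python) =====
-- def FreQuery(quries):
--     res = []
--     Freq = {}
--     cc = {}  # count-of-counts: cc[c] = number of keys whose frequency is c
--     for x in quries:
--         t, v = x[0], x[1]
--         if t == 1:
--             old = Freq.get(v)
--             if old is None:
--                 Freq[v] = 1
--                 cc[1] = cc.get(1, 0) + 1
--             else:
--                 cc[old] -= 1
--                 Freq[v] = old + 1
--                 cc[old + 1] = cc.get(old + 1, 0) + 1
--         elif t == 2:
--             if v in Freq and v > 0:
--                 old = Freq[v]
--                 cc[old] -= 1
--                 Freq[v] = old - 1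
--                 cc[old - 1] = cc.get(old - 1, 0) + 1
--         else:
--             res.append(1 if cc.get(v, 0) > 0 else 0)
--     return res
-- ===== Notes on version B (the rewrite author's own statement) =====
-- stated objective: alternative
-- what changed: B maintains an auxiliary count-of-counts dict updated in O(1) per operation and answers each frequency query by a single lookup, instead of A's rebuilding set(Freq.values()) on every type-3 query.
import Mathlib
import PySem

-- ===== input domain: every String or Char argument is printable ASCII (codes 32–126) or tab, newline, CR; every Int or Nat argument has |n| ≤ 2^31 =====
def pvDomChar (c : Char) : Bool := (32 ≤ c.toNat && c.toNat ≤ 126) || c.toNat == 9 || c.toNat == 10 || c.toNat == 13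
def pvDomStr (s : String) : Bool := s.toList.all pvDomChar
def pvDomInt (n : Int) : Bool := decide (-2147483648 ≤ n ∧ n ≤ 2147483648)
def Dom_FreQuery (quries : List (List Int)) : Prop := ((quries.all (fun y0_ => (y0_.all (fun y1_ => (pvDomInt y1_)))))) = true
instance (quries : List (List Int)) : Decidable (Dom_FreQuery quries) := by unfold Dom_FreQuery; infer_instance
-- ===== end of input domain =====

-- B replaces A's per-query scan of set(Freq.values()) by a count-of-counts dict consulted with a single lookup per type-3 query (alternative data structure; not measured faster).

-- ===== PORT A =====
def FreQueryStepA (st : List Int × PySem.Dict Int Int) (x : List Int) :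
    List Int × PySem.Dict Int Int :=
  let res := st.1
  let Freq := st.2
  match PySem.List.pyGet? x 0, PySem.List.pyGet? x 1 with
  | some x0, some x1 =>
  if x0 = 1 then
    (res, Freq.modify x1 0 (· + 1))          -- Freq[x[1]] += 1  (defaultdict(int))
  else if x0 = 2 then
    if Freq.contains x1 ∧ x1 > 0 then
      (res, Freq.modify x1 0 (· - 1))        -- Freq[x[1]] -= 1
    else (res, Freq)
  else
    (res ++ [if (PySem.Set.ofList Freq.values).contains x1 then 1 else 0], Freq)
  | _, _ => st  -- unreachable under Pre_: Python raises IndexError on a short row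

def FreQuery (quries : List (List Int)) : List Int :=
  (quries.foldl FreQueryStepA ([], PySem.Dict.empty)).1

-- ===== PORT B =====
def FreQueryStepB (st : List Int × PySem.Dict Int Int × PySem.Dict Int Int) (x : List Int) :
    List Int × PySem.Dict Int Int × PySem.Dict Int Int :=
  let res := st.1
  let Freq := st.2.1
  let cc := st.2.2
  match PySem.List.pyGet? x 0, PySem.List.pyGet? x 1 with
  | some t, some v =>
  if t = 1 then
    match Freq.get? v with
    | none => (res, Freq.insert v 1, cc.insert 1 (cc.getD 1 0 + 1))
    | some old =>
        -- cc[old] -= 1: old is always a key of cc here, so modify's default is never read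
        let cc1 := cc.modify old 0 (· - 1)
        (res, Freq.insert v (old + 1), cc1.insert (old + 1) (cc1.getD (old + 1) 0 + 1))
  else if t = 2 then
    if Freq.contains v ∧ v > 0 then
      match Freq.get? v with
      | none => (res, Freq, cc)  -- unreachable: the guard just checked that v is a key
      | some old =>
          let cc1 := cc.modify old 0 (· - 1)
          (res, Freq.insert v (old - 1), cc1.insert (old - 1) (cc1.getD (old - 1) 0 + 1))
    else (res, Freq, cc)
  else
    (res ++ [if cc.getD v 0 > 0 then 1 else 0], Freq, cc)
  | _, _ => st  -- unreachable under Pre_: Python raises IndexError on a short row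

def FreQuery_alt (quries : List (List Int)) : List Int :=
  (quries.foldl FreQueryStepB ([], PySem.Dict.empty, PySem.Dict.empty)).1

-- ===== PRECONDITION & SPEC =====
-- Pre_ excludes exactly the inputs on which A raises IndexError: a query row with fewer than two entries.
def Pre_FreQuery (quries : List (List Int)) : Prop := ∀ x ∈ quries, 2 ≤ x.length
instance (quries : List (List Int)) : Decidable (Pre_FreQuery quries) := by
  unfold Pre_FreQuery; infer_instance
def pvWitness_FreQuery : List (List Int) := [[1, 5], [1, 5], [3, 2], [2, 5], [3, 1]]

def Spec_FreQuery (quries : List (List Int)) (out : List Int) : Prop := out = FreQuery_alt quries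
instance (quries : List (List Int)) (out : List Int) : Decidable (Spec_FreQuery quries out) := by
  unfold Spec_FreQuery; infer_instance

-- ===== CLAIM (what is proved, stated in full; the proofs are below) =====
def Claim_equal_FreQuery : Prop := ∀ (quries : List (List Int)), Dom_FreQuery quries →
  Pre_FreQuery quries → Spec_FreQuery quries (FreQuery quries)

-- ===== LEMMAS AND PROOFS =====

-- changing a predicate at exactly one element of a Nodup list shifts countP by the two indicators
lemma countP_update_one {l : List Int} (hnd : l.Nodup) {k : Int} (hk : k ∈ l)
    (f g : Int → Bool) (hne : ∀ j ∈ l, j ≠ k → g j = f j) :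
    l.countP g + (if f k then 1 else 0) = l.countP f + (if g k then 1 else 0) := by
  induction l with
  | nil => cases hk
  | cons a l ih =>
      rcases List.mem_cons.mp hk with rfl | hk'
      · have hl : l.countP g = l.countP f := by
          apply List.countP_congr
          intro j hj
          rw [hne j (List.mem_cons_of_mem _ hj) (fun h => (List.nodup_cons.mp hnd).1 (h ▸ hj))]
        rw [List.countP_cons, List.countP_cons, hl]
        split_ifs <;> omega
      · have ha : g a = f a :=
          hne a (List.mem_cons_self) (fun h => (List.nodup_cons.mp hnd).1 (h ▸ hk'))
        have hih := ih (List.nodup_cons.mp hnd).2 hk'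
          (fun j hj hjk => hne j (List.mem_cons_of_mem _ hj) hjk)
        rw [List.countP_cons, List.countP_cons, ha]
        split_ifs at hih ⊢ <;> omega

-- how many keys of F currently have frequency v
def freqCount (F : PySem.Dict Int Int) (v : Int) : Nat :=
  F.keys.countP (fun k => F.getD k 0 == v)

lemma freqCount_insert (F : PySem.Dict Int Int) (hnd : F.keys.Nodup) (k nv v : Int)
    (hk : F.contains k = true) :
    freqCount (F.insert k nv) v + (if F.getD k 0 = v then 1 else 0)
    = freqCount F v + (if nv = v then 1 else 0) := by
  have hkeys := PySem.Dict.keys_insert_of_contains F nv hk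
  have hkmem := (PySem.Dict.contains_iff_mem_keys F k).mp hk
  have h := countP_update_one hnd hkmem (fun j => F.getD j 0 == v)
    (fun j => (F.insert k nv).getD j 0 == v)
    (fun j _ hjk => by simp only [PySem.Dict.getD_insert_of_ne F nv 0 hjk])
  unfold freqCount
  rw [hkeys]
  simpa [PySem.Dict.getD_insert_self] using h

lemma mem_values_iff_freqCount_pos (F : PySem.Dict Int Int) (hnd : F.keys.Nodup) (v : Int) :
    v ∈ F.values ↔ 0 < freqCount F v := by
  rw [PySem.Dict.values_eq_map_keys F hnd 0, freqCount, List.countP_pos_iff]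
  constructor
  · intro hv
    rcases List.mem_map.mp hv with ⟨a, ha, hEq⟩
    exact ⟨a, ha, by simp [hEq]⟩
  · rintro ⟨a, ha, hEq⟩
    exact List.mem_map.mpr ⟨a, ha, by simpa using hEq⟩

-- cc stays the count-of-counts of F when an existing key k moves from frequency old to nv
lemma cc_step (F cc : PySem.Dict Int Int) (hnd : F.keys.Nodup)
    (hcc : ∀ v, cc.getD v 0 = (freqCount F v : Int))
    (k old nv : Int) (hk : F.contains k = true) (hold : F.getD k 0 = old) (hne : nv ≠ old) :
    ∀ v, ((cc.modify old 0 (· - 1)).insert nv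
        ((cc.modify old 0 (· - 1)).getD nv 0 + 1)).getD v 0
      = (freqCount (F.insert k nv) v : Int) := by
  intro v
  have hcount := freqCount_insert F hnd k nv v hk
  rw [hold] at hcount
  rw [PySem.Dict.getD_insert, PySem.Dict.getD_modify, PySem.Dict.getD_modify]
  have h1 := hcc v
  have h2 := hcc old
  have h3 := hcc nv
  by_cases hv : v = nv
  · subst hv
    rw [if_pos rfl]
    rw [if_neg (fun h : old = v => hne h.symm), if_pos rfl] at hcount
    rw [if_neg hne]
    omega
  · rw [if_neg hv]
    by_cases ho : v = old
    · subst ho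
      rw [if_pos rfl, if_neg (fun h : nv = v => hv h.symm)] at hcount
      rw [if_pos rfl]
      omega
    · rw [if_neg ho]
      rw [if_neg (fun h : old = v => ho h.symm), if_neg (fun h : nv = v => hv h.symm)] at hcount
      omega

-- cc stays the count-of-counts of F when a fresh key k enters with frequency 1
lemma cc_step_new (F cc : PySem.Dict Int Int)
    (hcc : ∀ v, cc.getD v 0 = (freqCount F v : Int))
    (k : Int) (hk : F.contains k = false) :
    ∀ v, (cc.insert 1 (cc.getD 1 0 + 1)).getD v 0 = (freqCount (F.insert k 1) v : Int) := by
  intro v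
  have hkmem : k ∉ F.keys := fun h => by
    rw [(PySem.Dict.contains_iff_mem_keys F k).mpr h] at hk; cases hk
  have hcount : freqCount (F.insert k 1) v
      = freqCount F v + (if (1 : Int) = v then 1 else 0) := by
    unfold freqCount
    rw [PySem.Dict.keys_insert_of_not_contains F 1 hk, List.countP_append]
    have hcongr : F.keys.countP (fun j => (F.insert k 1).getD j 0 == v)
        = F.keys.countP (fun j => F.getD j 0 == v) := by
      apply List.countP_congr
      intro j hj
      rw [PySem.Dict.getD_insert_of_ne F 1 0 (by rintro rfl; exact hkmem hj)]
    rw [hcongr]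
    simp only [List.countP_cons, List.countP_nil, PySem.Dict.getD_insert_self]
    by_cases hv : (1 : Int) = v
    · rw [if_pos hv]; simp [hv]
    · rw [if_neg hv]; simp [hv]
  rw [PySem.Dict.getD_insert, hcount]
  have h1 := hcc v
  have h2 := hcc 1
  by_cases hv : v = 1
  · subst hv; rw [if_pos rfl, if_pos rfl]; omega
  · rw [if_neg hv, if_neg (fun h : (1:Int) = v => hv h.symm)]; omega

-- the loop invariant, pushed through the two folds
lemma FreQuery_loop (qs : List (List Int)) (res : List Int) (F cc : PySem.Dict Int Int)
    (hpre : ∀ x ∈ qs, 2 ≤ x.length)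
    (hnd : F.keys.Nodup)
    (hcc : ∀ v, cc.getD v 0 = (freqCount F v : Int)) :
    (qs.foldl FreQueryStepA (res, F)).1 = (qs.foldl FreQueryStepB (res, F, cc)).1 := by
  induction qs generalizing res F cc with
  | nil => rfl
  | cons x qs ih =>
    have hx := hpre x List.mem_cons_self
    have hpre' : ∀ y ∈ qs, 2 ≤ y.length := fun y hy => hpre y (List.mem_cons_of_mem _ hy)
    simp only [List.foldl_cons]
    obtain ⟨x0, hx0⟩ : ∃ a, PySem.List.pyGet? x 0 = some a :=
      ⟨_, by exact_mod_cast PySem.List.pyGet?_ofNat x _ (by omega : 0 < x.length)⟩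
    obtain ⟨x1, hx1⟩ : ∃ a, PySem.List.pyGet? x 1 = some a :=
      ⟨_, by exact_mod_cast PySem.List.pyGet?_ofNat x _ (by omega : 1 < x.length)⟩
    by_cases h1 : x0 = 1
    · -- insert query
      have hmod : F.modify x1 0 (· + 1) = F.insert x1 (F.getD x1 0 + 1) := rfl
      by_cases hc : F.contains x1 = true
      · obtain ⟨old, hold⟩ : ∃ old, F.get? x1 = some old :=
          Option.isSome_iff_exists.mp (by rw [← PySem.Dict.contains_eq_isSome_get?]; exact hc)
        have hgetD : F.getD x1 0 = old := PySem.Dict.getD_of_get?_eq_some F 0 hold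
        have hA : FreQueryStepA (res, F) x = (res, F.insert x1 (old + 1)) := by
          simp only [FreQueryStepA, hx0, hx1, if_pos h1, hmod, hgetD]
        have hB : FreQueryStepB (res, F, cc) x =
            (res, F.insert x1 (old + 1),
              (cc.modify old 0 (· - 1)).insert (old + 1)
                ((cc.modify old 0 (· - 1)).getD (old + 1) 0 + 1)) := by
          simp only [FreQueryStepB, hx0, hx1, if_pos h1, hold]
        rw [hA, hB]
        exact ih res _ _ hpre' (PySem.Dict.nodup_keys_insert F x1 (old + 1) hnd)
          (cc_step F cc hnd hcc x1 old (old + 1) hc hgetD (by omega))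
      · have hcf : F.contains x1 = false := by
          cases h : F.contains x1
          · rfl
          · exact absurd h hc
        have hget : F.get? x1 = none := by
          rcases h : F.get? x1 with _ | o
          · rfl
          · exact absurd (by rw [PySem.Dict.contains_eq_isSome_get?, h]; rfl) hc
        have hgetD : F.getD x1 0 = 0 := PySem.Dict.getD_of_get?_eq_none F 0 hget
        have hA : FreQueryStepA (res, F) x = (res, F.insert x1 1) := by
          simp only [FreQueryStepA, hx0, hx1, if_pos h1, hmod, hgetD, zero_add]
        have hB : FreQueryStepB (res, F, cc) x =
            (res, F.insert x1 1, cc.insert 1 (cc.getD 1 0 + 1)) := by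
          simp only [FreQueryStepB, hx0, hx1, if_pos h1, hget]
        rw [hA, hB]
        exact ih res _ _ hpre' (PySem.Dict.nodup_keys_insert F x1 1 hnd)
          (cc_step_new F cc hcc x1 hcf)
    · by_cases h2 : x0 = 2
      · -- delete query
        by_cases hg : F.contains x1 = true ∧ x1 > 0
        · obtain ⟨old, hold⟩ : ∃ old, F.get? x1 = some old :=
            Option.isSome_iff_exists.mp
              (by rw [← PySem.Dict.contains_eq_isSome_get?]; exact hg.1)
          have hgetD : F.getD x1 0 = old := PySem.Dict.getD_of_get?_eq_some F 0 hold
          have hmod : F.modify x1 0 (· - 1) = F.insert x1 (F.getD x1 0 - 1) := rfl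
          have hA : FreQueryStepA (res, F) x = (res, F.insert x1 (old - 1)) := by
            simp only [FreQueryStepA, hx0, hx1, if_neg h1, if_pos h2, if_pos hg, hmod,
              hgetD]
          have hB : FreQueryStepB (res, F, cc) x =
              (res, F.insert x1 (old - 1),
                (cc.modify old 0 (· - 1)).insert (old - 1)
                  ((cc.modify old 0 (· - 1)).getD (old - 1) 0 + 1)) := by
            simp only [FreQueryStepB, hx0, hx1, if_neg h1, if_pos h2, if_pos hg, hold]
          rw [hA, hB]
          exact ih res _ _ hpre' (PySem.Dict.nodup_keys_insert F x1 (old - 1) hnd)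
            (cc_step F cc hnd hcc x1 old (old - 1) hg.1 hgetD (by omega))
        · have hA : FreQueryStepA (res, F) x = (res, F) := by
            simp only [FreQueryStepA, hx0, hx1, if_neg h1, if_pos h2, if_neg hg]
          have hB : FreQueryStepB (res, F, cc) x = (res, F, cc) := by
            simp only [FreQueryStepB, hx0, hx1, if_neg h1, if_pos h2, if_neg hg]
          rw [hA, hB]
          exact ih res F cc hpre' hnd hcc
      · -- frequency query
        have hmem : (PySem.Set.ofList F.values).contains x1 = true ↔ x1 ∈ F.values := by
          simp [pysem]
        have heq : (if (PySem.Set.ofList F.values).contains x1 then (1:Int) else 0)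
            = (if cc.getD x1 0 > 0 then 1 else 0) := by
          have h1' := hcc x1
          by_cases hin : x1 ∈ F.values
          · rw [if_pos (hmem.mpr hin), if_pos]
            have := (mem_values_iff_freqCount_pos F hnd x1).mp hin
            omega
          · rw [if_neg (fun h => hin (hmem.mp h)), if_neg]
            have : ¬ 0 < freqCount F x1 :=
              fun h => hin ((mem_values_iff_freqCount_pos F hnd x1).mpr h)
            omega
        have hA : FreQueryStepA (res, F) x =
            (res ++ [if (PySem.Set.ofList F.values).contains x1 then 1 else 0], F) := by
          simp only [FreQueryStepA, hx0, hx1, if_neg h1, if_neg h2]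
        have hB : FreQueryStepB (res, F, cc) x =
            (res ++ [if cc.getD x1 0 > 0 then 1 else 0], F, cc) := by
          simp only [FreQueryStepB, hx0, hx1, if_neg h1, if_neg h2]
        rw [hA, hB, heq]
        exact ih _ F cc hpre' hnd hcc

-- ===== VERDICT (by name: the statement is the Claim_ definition above) =====
theorem FreQuery_spec : Claim_equal_FreQuery := by
  intro quries _ hpre
  unfold Spec_FreQuery FreQuery FreQuery_alt
  exact FreQuery_loop quries [] PySem.Dict.empty PySem.Dict.empty hpre
    (by simp [pysem]) (by intro v; simp [pysem, freqCount])
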